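-- pv_equiv track=rewrite | github.com/shymonski-dev/qknot | backend/quantum_engine.py | _count_two_qubit_gates
-- ===== SOURCE A (Python) =====
-- def _count_two_qubit_gates(operation_counts: dict[str, int]):
--     two_qubit_gate_names = {
--         "cx",
--         "cz",
--         "cp",
--         "swap",
--         "ecr",
--         "rzz",
--         "rxx",
--         "ryy",
--         "iswap",
--         "crx",
--         "cry",
--         "crz",
--     }
--     return sum(
--         count
--         for gate_name, count in operation_counts.items()
--         if gate_name in two_qubit_gate_names
--     )
-- ===== SOURCE B (Python) =====
-- def _total(names, operation_counts):
--     if not names: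
--         return 0
--     return operation_counts.get(names[0], 0) + _total(names[1:], operation_counts)
--
--
-- def _count_two_qubit_gates(operation_counts: dict[str, int]):
--     return _total(
--         "cx cz cp swap ecr rzz rxx ryy iswap crx cry crz".split(),
--         operation_counts,
--     )
-- ===== Notes on version B (the rewrite author's own statement) =====
-- stated objective: alternative
-- what changed: B recurses over the fixed 12-gate name list (obtained by splitting one string), adding operation_counts.get(name, 0) for each name, instead of A's single scan over all dict entries filtered by set membership; Pre_ requires distinct keys, which every Python dict argument satisfies by construction.
import Mathlib
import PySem

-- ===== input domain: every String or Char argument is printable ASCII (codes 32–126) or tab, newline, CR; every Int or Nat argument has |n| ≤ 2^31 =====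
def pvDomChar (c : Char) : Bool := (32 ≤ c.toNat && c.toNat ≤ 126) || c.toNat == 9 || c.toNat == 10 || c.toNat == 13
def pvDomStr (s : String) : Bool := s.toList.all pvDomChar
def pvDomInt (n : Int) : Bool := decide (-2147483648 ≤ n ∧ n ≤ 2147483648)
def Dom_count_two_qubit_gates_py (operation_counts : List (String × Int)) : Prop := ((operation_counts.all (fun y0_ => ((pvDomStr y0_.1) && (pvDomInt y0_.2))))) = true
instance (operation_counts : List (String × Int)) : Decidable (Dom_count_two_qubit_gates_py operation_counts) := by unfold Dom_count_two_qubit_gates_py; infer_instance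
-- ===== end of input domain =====

-- B recurses over the fixed 12-gate name list (split from one string), adding get(name, 0)
-- per name, instead of A's scan over all dict entries filtered by set membership
-- (objective: alternative traversal; same exact result).

-- ===== PORT A =====
-- Python set literal of the 12 two-qubit gate names
def twoQubitGateNames : PySem.Set String :=
  PySem.Set.ofList ["cx", "cz", "cp", "swap", "ecr", "rzz", "rxx", "ryy", "iswap", "crx", "cry", "crz"]

def count_two_qubit_gates_py (operation_counts : List (String × Int)) : Int :=
  operation_counts.foldl
    (fun acc p => if p.1 ∈ twoQubitGateNames then acc + p.2 else acc) 0

-- ===== PORT B =====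
-- helper _total: structural recursion on the name list, adding the dict lookup of the head
def pvTotal : List String → PySem.Dict String Int → Int
  | [], _ => 0
  | n :: rest, d => d.getD n 0 + pvTotal rest d

def count_two_qubit_gates_py_alt (operation_counts : List (String × Int)) : Int :=
  pvTotal (PySem.Str.split₀ "cx cz cp swap ecr rzz rxx ryy iswap crx cry crz")
    (PySem.Dict.mk operation_counts)

-- ===== PRECONDITION & SPEC =====
-- Pre_ requires the association list to have pairwise-distinct keys: the Python argument is a
-- dict, whose keys are distinct by construction, so Pre_ excludes no actual Python input.
def Pre_count_two_qubit_gates_py (operation_counts : List (String × Int)) : Prop :=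
  (operation_counts.map Prod.fst).Nodup
instance (operation_counts : List (String × Int)) : Decidable (Pre_count_two_qubit_gates_py operation_counts) := by unfold Pre_count_two_qubit_gates_py; infer_instance

def pvWitness_count_two_qubit_gates_py : (List (String × Int)) := [("cx", 2), ("h", 5), ("swap", 1)]

def Spec_count_two_qubit_gates_py (operation_counts : List (String × Int)) (out : Int) : Prop := out = count_two_qubit_gates_py_alt operation_counts
instance (operation_counts : List (String × Int)) (out : Int) : Decidable (Spec_count_two_qubit_gates_py operation_counts out) := by unfold Spec_count_two_qubit_gates_py; infer_instance

-- ===== CLAIM (what is proved, stated in full; the proofs are below) =====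
def Claim_equal_count_two_qubit_gates_py : Prop := ∀ (operation_counts : List (String × Int)), Dom_count_two_qubit_gates_py operation_counts → Pre_count_two_qubit_gates_py operation_counts → Spec_count_two_qubit_gates_py operation_counts (count_two_qubit_gates_py operation_counts)

-- ===== LEMMAS AND PROOFS =====

-- the 12 gate names as a plain list, for the proofs
def gateNamesList : List String :=
  ["cx", "cz", "cp", "swap", "ecr", "rzz", "rxx", "ryy", "iswap", "crx", "cry", "crz"]

-- B's split produces exactly that list
lemma split_eq_gateNames :
    PySem.Str.split₀ "cx cz cp swap ecr rzz rxx ryy iswap crx cry crz" = gateNamesList := by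
  decide

-- A's set literal holds exactly that list
lemma names_eq_list : (twoQubitGateNames : List String) = gateNamesList := by decide

-- pvTotal is the sum of the lookups
lemma pvTotal_eq_sum (l : List String) (d : PySem.Dict String Int) :
    pvTotal l d = (l.map (fun n => d.getD n 0)).sum := by
  induction l with
  | nil => rfl
  | cons n t ih => simp [pvTotal, ih]

-- fold with a conditional add equals accumulator plus the filtered mapped sum
lemma foldl_cond_add (l : List (String × Int)) (p : String × Int → Prop) [DecidablePred p] (a : Int) :
    l.foldl (fun acc q => if p q then acc + q.2 else acc) a
      = a + ((l.filter (fun q => decide (p q))).map Prod.snd).sum := by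
  induction l generalizing a with
  | nil => simp
  | cons q t ih =>
      by_cases hq : p q <;> simp [List.foldl_cons, List.filter_cons, hq, ih] <;> ring

-- lookup misses entirely when the key is absent
lemma getD_mk_of_not_key (t : List (String × Int)) (k : String)
    (h : ∀ p ∈ t, p.1 ≠ k) : (PySem.Dict.mk t).getD k 0 = 0 := by
  induction t with
  | nil => rfl
  | cons p rest ih =>
      have hpk : p.1 ≠ k := h p (List.mem_cons_self ..)
      rw [PySem.Dict.getD_eq_get?_getD,
        show (p : String × Int) = (p.1, p.2) from rfl, PySem.Dict.get?_mk_cons]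
      have : (p.1 == k) = false := by simpa using hpk
      rw [this, if_neg (by simp)]
      rw [← PySem.Dict.getD_eq_get?_getD]
      exact ih (fun q hq => h q (List.mem_cons_of_mem _ hq))

-- cons-step of the dict lookup
lemma getD_mk_cons (k m : String) (v : Int) (t : List (String × Int)) :
    (PySem.Dict.mk ((k, v) :: t)).getD m 0
      = if k = m then v else (PySem.Dict.mk t).getD m 0 := by
  rw [PySem.Dict.getD_eq_get?_getD, PySem.Dict.get?_mk_cons]
  by_cases hkm : k = m <;> simp [hkm, ← PySem.Dict.getD_eq_get?_getD]

-- peeling one dict entry off the sum over the gate-name list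
lemma sum_getD_cons (G : List String) (hG : G.Nodup) (k : String) (v : Int)
    (t : List (String × Int)) (ht : ∀ p ∈ t, p.1 ≠ k) :
    (G.map (fun n => (PySem.Dict.mk ((k, v) :: t)).getD n 0)).sum
      = (if k ∈ G then v else 0) + (G.map (fun n => (PySem.Dict.mk t).getD n 0)).sum := by
  induction G with
  | nil => simp
  | cons n G' ih =>
      have hG' : G'.Nodup := hG.of_cons
      by_cases hnk : k = n
      · subst hnk
        have hkG' : k ∉ G' := (List.nodup_cons.mp hG).1
        have hmapeq : (G'.map (fun n => (PySem.Dict.mk ((k, v) :: t)).getD n 0))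
            = G'.map (fun n => (PySem.Dict.mk t).getD n 0) := by
          apply List.map_congr_left
          intro m hm
          have hkm : k ≠ m := fun h => hkG' (h ▸ hm)
          rw [getD_mk_cons, if_neg hkm]
        rw [List.map_cons, List.map_cons, List.sum_cons, List.sum_cons,
          getD_mk_cons, if_pos rfl, hmapeq, getD_mk_of_not_key t k ht,
          if_pos (List.mem_cons_self ..)]
        ring
      · rw [List.map_cons, List.map_cons, List.sum_cons, List.sum_cons,
          getD_mk_cons k n v t, if_neg hnk, ih hG']
        have hiff : (k ∈ n :: G') ↔ (k ∈ G') := by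
          simp [List.mem_cons, hnk]
        by_cases hkG : k ∈ G' <;> simp [hiff, hkG] <;> ring

-- the two summations agree on nodup-key association lists
lemma filter_sum_eq_gate_sum (oc : List (String × Int))
    (h : (oc.map Prod.fst).Nodup) :
    ((oc.filter (fun p => decide (p.1 ∈ twoQubitGateNames))).map Prod.snd).sum
      = (gateNamesList.map (fun n => (PySem.Dict.mk oc).getD n 0)).sum := by
  induction oc with
  | nil => decide
  | cons p t ih =>
      have hnd : (t.map Prod.fst).Nodup := (List.nodup_cons.mp h).2
      have hk : p.1 ∉ t.map Prod.fst := (List.nodup_cons.mp h).1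
      have ht : ∀ q ∈ t, q.1 ≠ p.1 := by
        intro q hq he
        exact hk (he ▸ List.mem_map_of_mem hq)
      have hlist : gateNamesList.Nodup := by decide
      have hmem : (p.1 ∈ twoQubitGateNames) ↔ (p.1 ∈ gateNamesList) := by
        rw [names_eq_list]
      rw [show (p : String × Int) = (p.1, p.2) from rfl,
        sum_getD_cons gateNamesList hlist p.1 p.2 t ht, ← ih hnd]
      by_cases hp : p.1 ∈ twoQubitGateNames
      · rw [List.filter_cons, if_pos (by simpa using hp), List.map_cons, List.sum_cons,
          if_pos (hmem.mp hp)]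
      · rw [List.filter_cons, if_neg (by simpa using hp),
          if_neg (fun hc => hp (hmem.mpr hc))]
        ring

-- ===== VERDICT (by name: the statement is the Claim_ definition above) =====
theorem count_two_qubit_gates_py_spec : Claim_equal_count_two_qubit_gates_py := by
  intro oc _ hpre
  unfold Spec_count_two_qubit_gates_py count_two_qubit_gates_py count_two_qubit_gates_py_alt
  rw [foldl_cond_add oc (fun p => p.1 ∈ twoQubitGateNames) 0, zero_add,
    split_eq_gateNames, pvTotal_eq_sum]
  exact filter_sum_eq_gate_sum oc hpre
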